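-- pv_equiv track=rewrite | github.com/Wizerty23/Hackerrank | Python/String Split.py | split_and_join
-- ===== SOURCE A (Python) =====
-- def split_and_join(line):
--     x = ""
--     for c in line:
--         if c == " ":
--             c = "-"
--             x += c
--         else:
--             x += c
--     return x
-- ===== SOURCE B (Python) =====
-- def split_and_join(line):
--     return "-".join(line.split(" "))
-- ===== Notes on version B (the rewrite author's own statement) =====
-- stated objective: idiomatic
-- what changed: Replaces the character-by-character accumulation loop with split-on-single-space then join-with-dash, the standard-library idiom (C-implemented str.split/str.join avoid per-character Python bytecode).
import Mathlib
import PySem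

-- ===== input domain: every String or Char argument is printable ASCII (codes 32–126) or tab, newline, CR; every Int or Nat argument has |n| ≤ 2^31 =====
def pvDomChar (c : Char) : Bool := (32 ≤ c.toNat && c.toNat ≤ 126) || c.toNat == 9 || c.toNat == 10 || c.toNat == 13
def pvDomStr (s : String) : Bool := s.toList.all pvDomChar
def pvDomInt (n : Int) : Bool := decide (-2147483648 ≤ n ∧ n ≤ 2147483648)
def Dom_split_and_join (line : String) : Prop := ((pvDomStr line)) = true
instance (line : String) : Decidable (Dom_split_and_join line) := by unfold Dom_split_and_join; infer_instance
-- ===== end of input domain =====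

-- B replaces A's character-accumulation loop with the idiomatic split(" ")/join("-"); return values agree, no side effects.

-- ===== PORT A =====
-- for c in line: if c == " ": x += "-" else: x += c   (built over List Char; String.append is opaque to the kernel)
def split_and_join (line : String) : String :=
  String.ofList (line.toList.foldl (fun x c => if c == ' ' then x ++ ['-'] else x ++ [c]) [])

-- ===== PORT B =====
-- "-".join(line.split(" ")); split? is total Python split (none only for empty sep, and " " ≠ "")
def split_and_join_alt (line : String) : String :=
  match PySem.Str.split? line " " with
  | some parts => PySem.Str.join "-" parts
  | none => ""

-- ===== PRECONDITION & SPEC =====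
def Spec_split_and_join (line : String) (out : String) : Prop := out = split_and_join_alt line
instance (line : String) (out : String) : Decidable (Spec_split_and_join line out) := by unfold Spec_split_and_join; infer_instance

-- ===== CLAIM (what is proved, stated in full; the proofs are below) =====
def Claim_equal_split_and_join : Prop := ∀ (line : String), Dom_split_and_join line → Spec_split_and_join line (split_and_join line)

-- ===== LEMMAS AND PROOFS =====

/-- The character map A applies. -/
def dashChar (c : Char) : Char := if c == ' ' then '-' else c

/-- Pure structural-recursive form of splitting on a single space. -/
def spSplit (cur : List Char) : List Char → List (List Char)
  | [] => [cur.reverse]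
  | c :: rest => if c = ' ' then cur.reverse :: spSplit [] rest else spSplit (c :: cur) rest

theorem spSplit_ne_nil (l cur : List Char) : ∃ q t, spSplit cur l = q :: t := by
  induction l generalizing cur with
  | nil => exact ⟨cur.reverse, [], rfl⟩
  | cons c rest ih =>
    by_cases h : c = ' '
    · exact ⟨cur.reverse, spSplit [] rest, by simp [spSplit, h]⟩
    · obtain ⟨q, t, hq⟩ := ih (c :: cur)
      exact ⟨q, t, by simp [spSplit, h, hq]⟩

theorem go_eq_spSplit (fuel : Nat) (l cur : List Char) (acc : List (List Char))
    (h : l.length < fuel) :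
    PySem.Chars.splitOn.go [' '] fuel l cur acc = acc.reverse ++ spSplit cur l := by
  induction fuel generalizing l cur acc with
  | zero => omega
  | succ fuel ih =>
    cases l with
    | nil => simp [PySem.Chars.splitOn.go, spSplit]
    | cons c rest =>
      by_cases hc : c = ' '
      · subst hc
        have : [' '].isPrefixOf (' ' :: rest) = true := by simp [List.isPrefixOf]
        rw [PySem.Chars.splitOn.go, if_pos this]
        simp only [List.length_singleton, List.drop_succ_cons, List.drop_zero]
        rw [ih rest [] (cur.reverse :: acc) (by simpa using Nat.lt_of_succ_lt_succ h)]
        simp [spSplit]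
      · have hp : [' '].isPrefixOf (c :: rest) = false := by
          simp [List.isPrefixOf, Ne.symm hc]
        rw [PySem.Chars.splitOn.go, if_neg (by simp [hp])]
        rw [ih rest (c :: cur) acc (by simpa using Nat.lt_of_succ_lt_succ h)]
        simp [spSplit, hc]

theorem splitOn_eq_spSplit (l : List Char) :
    PySem.Chars.splitOn l [' '] = spSplit [] l := by
  have := go_eq_spSplit (l.length + 1) l [] [] (by omega)
  simpa [PySem.Chars.splitOn] using this

theorem join_spSplit (l cur : List Char) :
    PySem.Chars.join ['-'] (spSplit cur l) = cur.reverse ++ l.map dashChar := by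
  induction l generalizing cur with
  | nil => simp [spSplit, PySem.Chars.join_singleton]
  | cons c rest ih =>
    by_cases hc : c = ' '
    · subst hc
      obtain ⟨q, t, hq⟩ := spSplit_ne_nil rest []
      rw [show spSplit cur (' ' :: rest) = cur.reverse :: spSplit [] rest by simp [spSplit]]
      rw [hq, PySem.Chars.join_cons_cons, ← hq, ih]
      simp [dashChar]
    · rw [show spSplit cur (c :: rest) = spSplit (c :: cur) rest by simp [spSplit, hc]]
      rw [ih]
      simp [dashChar, hc]

theorem foldl_dash (l x0 : List Char) :
    l.foldl (fun x c => if c == ' ' then x ++ ['-'] else x ++ [c]) x0 = x0 ++ l.map dashChar := by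
  induction l generalizing x0 with
  | nil => simp
  | cons c rest ih =>
    simp only [List.foldl_cons, List.map_cons]
    by_cases hc : c = ' '
    · rw [if_pos (by simp [hc]), ih]; simp [dashChar, hc]
    · rw [if_neg (by simp [hc]), ih]; simp [dashChar, hc]

-- ===== VERDICT (by name: the statement is the Claim_ definition above) =====
theorem split_and_join_spec : Claim_equal_split_and_join := by
  intro line _
  unfold Spec_split_and_join split_and_join split_and_join_alt
  rw [show PySem.Str.split? line " " =
      some (List.map String.ofList (PySem.Chars.splitOn line.toList [' '])) by
    simp [PySem.Str.split?, PySem.Chars.split?]]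
  simp only [PySem.Str.join, foldl_dash]
  congr 1
  rw [splitOn_eq_spSplit, List.map_map]
  have hid : (String.toList ∘ String.ofList) = id := funext fun l => by simp
  rw [hid, List.map_id]
  have h := join_spSplit line.toList []
  simpa using h.symm
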